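-- pv_equiv track=rewrite | github.com/irenee-14/Python | bronze/n6500.py | middle_square_method
-- ===== SOURCE A (Python) =====
-- def middle_square_method(a0):
--     seen = set()  # 서로 다른 수를 저장할 집합
--     current = a0  # 초기값
--     while current not in seen:  # 현재 값이 이미 생성된 수가 아닐 때까지 반복
--         seen.add(current)  # 현재 수를 집합에 추가
--         # 현재 수를 제곱하고 길이를 2*n로 맞춘 후 가운데 n자리 추출
--         squared = str(current ** 2).zfill(8)  # 2*n = 8
--         current = int(squared[2:6])  # 가운데 4자리 추출
--     return len(seen)  # 서로 다른 수의 개수 반환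
-- ===== SOURCE B (Python) =====
-- def middle_square_method(a0):
--     # Cycle-structure approach: the update f maps every value to a 4-digit window,
--     # so after 10001 steps the iterate is guaranteed to sit inside the cycle.
--     # The answer (number of distinct values before the first repeat) is tail + cycle
--     # length (mu + lam), found without storing any visited set.
--     def f(x):
--         return int(str(x ** 2).zfill(8)[2:6])
--     y = a0
--     for _ in range(10001):
--         y = f(y)
--     # lam: length of the cycle containing y
--     lam = 1
--     z = f(y)
--     while z != y:
--         z = f(z)
--         lam += 1
--     # mu: length of the tail before the cycle
--     u = a0
--     v = a0
--     for _ in range(lam):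
--         v = f(v)
--     mu = 0
--     while u != v:
--         u = f(u)
--         v = f(v)
--         mu += 1
--     return mu + lam
-- ===== Notes on version B (the rewrite author's own statement) =====
-- stated objective: alternative
-- what changed: Replaces A's grow-a-set-until-repeat loop by cycle detection: since every generated value is a 4-digit window, the iterate after 10001 steps is inside the cycle, so B finds the cycle length and tail length with O(1) extra memory and returns tail+cycle instead of the set's size.
import Mathlib
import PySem

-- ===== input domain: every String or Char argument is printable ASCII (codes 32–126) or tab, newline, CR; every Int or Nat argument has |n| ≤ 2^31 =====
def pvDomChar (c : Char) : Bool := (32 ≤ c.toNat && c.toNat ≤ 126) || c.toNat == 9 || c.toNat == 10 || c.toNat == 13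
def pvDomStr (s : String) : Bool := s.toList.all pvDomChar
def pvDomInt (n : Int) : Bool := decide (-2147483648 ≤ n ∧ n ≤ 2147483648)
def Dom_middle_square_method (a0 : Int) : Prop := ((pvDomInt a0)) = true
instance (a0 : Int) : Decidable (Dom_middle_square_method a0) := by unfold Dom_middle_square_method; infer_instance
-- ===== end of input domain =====

-- B replaces A's visited-set loop by cycle detection: advance 10001 steps (provably inside
-- the cycle, since every generated value is a 4-digit window), then measure cycle length and
-- tail length; an alternative algorithm of similar cost returning the same distinct count.


-- ===== PORT A =====
-- A's while loop; the fuel argument is only a totality guard (the loop is proved below to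
-- return within 10002 iterations, since every generated value is one of the 10000 4-digit
-- windows).  int(...) never raises here (its argument is 4 digit chars, proved below), so
-- the .getD 0 default is unreachable.
def msmALoop : Nat → PySem.Set Int → Int → Int
  | 0, _, _ => 0
  | fuel+1, seen, current =>
    if PySem.Set.contains seen current then PySem.Set.len seen
    else
      let squared := PySem.Str.zfill (PySem.Int.toStr (current ^ 2)) 8
      msmALoop fuel (PySem.Set.add seen current)
        ((PySem.Int.ofStr? (PySem.Str.slice squared (some 2) (some 6))).getD 0)

def middle_square_method (a0 : Int) : Int := msmALoop 10002 PySem.Set.empty a0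

-- ===== PORT B =====
-- helper f of Source B
def msmF (x : Int) : Int :=
  (PySem.Int.ofStr? (PySem.Str.slice (PySem.Str.zfill (PySem.Int.toStr (x ^ 2)) 8) (some 2) (some 6))).getD 0

-- 'for _ in range(10001): y = f(y)'
def msmAdvance : Nat → Int → Int
  | 0, x => x
  | n+1, x => msmAdvance n (msmF x)

-- 'while z != y: z = f(z); lam += 1' (fuel is only a totality guard, proved sufficient below)
def msmLamLoop : Nat → Int → Int → Int → Int
  | 0, _, _, lam => lam
  | fuel+1, y, z, lam => if z == y then lam else msmLamLoop fuel y (msmF z) (lam + 1)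

-- 'while u != v: u = f(u); v = f(v); mu += 1' (fuel likewise)
def msmMuLoop : Nat → Int → Int → Int → Int
  | 0, _, _, mu => mu
  | fuel+1, u, v, mu => if u == v then mu else msmMuLoop fuel (msmF u) (msmF v) (mu + 1)

def middle_square_method_alt (a0 : Int) : Int :=
  let y := msmAdvance 10001 a0
  let lam := msmLamLoop 10001 y (msmF y) 1
  let v := (PySem.List.pyRange 0 lam 1).foldl (fun w _ => msmF w) a0
  msmMuLoop 10001 a0 v 0 + lam

-- ===== PRECONDITION & SPEC =====
def Spec_middle_square_method (a0 : Int) (out : Int) : Prop := out = middle_square_method_alt a0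
instance (a0 : Int) (out : Int) : Decidable (Spec_middle_square_method a0 out) := by unfold Spec_middle_square_method; infer_instance

-- ===== CLAIM (what is proved, stated in full; the proofs are below) =====
def Claim_equal_middle_square_method : Prop := ∀ (a0 : Int), Dom_middle_square_method a0 → Spec_middle_square_method a0 (middle_square_method a0)

-- ===== LEMMAS AND PROOFS =====

def msmDigitChar (i : Fin 10) : Char := Char.ofNat (48 + i.val)
lemma msm_digitChar_isdigit : ∀ i : Fin 10, PySem.Chars.isdigit (Nat.digitChar i.val) = true := by decide

lemma msm_toDigitsCore_digits :
    ∀ (fuel n : Nat) (ds : List Char), (∀ c ∈ ds, PySem.Chars.isdigit c = true) →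
      ∀ c ∈ Nat.toDigitsCore 10 fuel n ds, PySem.Chars.isdigit c = true := by
  intro fuel
  induction fuel with
  | zero => intro n ds h; simpa [Nat.toDigitsCore] using h
  | succ fuel ih =>
    intro n ds h
    have hd : ∀ c ∈ ((n % 10).digitChar :: ds), PySem.Chars.isdigit c = true := by
      intro c hc
      rcases List.mem_cons.mp hc with rfl | hc
      · exact msm_digitChar_isdigit ⟨n % 10, Nat.mod_lt _ (by norm_num)⟩
      · exact h c hc
    by_cases hn : n / 10 = 0
    · simpa [Nat.toDigitsCore, hn] using hd
    · simpa [Nat.toDigitsCore, hn] using ih (n / 10) _ hd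

lemma msm_toChars_digits (m : Int) (hm : 0 ≤ m) :
    ∀ c ∈ PySem.Int.toChars m, PySem.Chars.isdigit c = true := by
  intro c hc
  rw [PySem.Int.toChars, if_neg (by omega)] at hc
  exact msm_toDigitsCore_digits _ _ [] (by simp) c hc

lemma msm_zfill_digits (cs : List Char) (h : ∀ c ∈ cs, PySem.Chars.isdigit c = true) :
    ∀ c ∈ PySem.Chars.zfill cs 8, PySem.Chars.isdigit c = true := by
  intro c hc
  rw [PySem.Chars.zfill.eq_def] at hc
  cases cs with
  | nil =>
    simp at hc
    subst hc; decide
  | cons c0 rest =>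
    have h0 : PySem.Chars.isdigit c0 = true := h c0 (by simp)
    have hsgn : ¬ (c0 = '+' ∨ c0 = '-') := by
      rintro (rfl | rfl) <;> simp [PySem.Chars.isdigit] at h0
    split at hc
    · exact h c hc
    · split at hc
      case _ heq =>
        injection heq with h1 h2
        subst h1; subst h2
        rw [if_neg hsgn] at hc
        rcases List.mem_append.mp hc with hr | hm'
        · have := List.eq_of_mem_replicate hr; subst this; decide
        · exact h c hm'
      case _ =>
        have := List.eq_of_mem_replicate hc; subst this; decide

lemma msm_digit_exists (c : Char) (h : PySem.Chars.isdigit c = true) :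
    ∃ i : Fin 10, c = msmDigitChar i := by
  have hb : 48 ≤ c.toNat ∧ c.toNat ≤ 57 := by
    simp [PySem.Chars.isdigit, Char.le_def] at h
    exact ⟨h.1, h.2⟩
  refine ⟨⟨c.toNat - 48, by omega⟩, ?_⟩
  have : 48 + (c.toNat - 48) = c.toNat := by omega
  rw [msmDigitChar]; simp only [this]
  exact (Char.ofNat_toNat c).symm

lemma msm_ofChars_four :
    ∀ a b c d : Fin 10,
      0 ≤ (PySem.Int.ofChars? [msmDigitChar a, msmDigitChar b, msmDigitChar c, msmDigitChar d]).getD 0 ∧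
      (PySem.Int.ofChars? [msmDigitChar a, msmDigitChar b, msmDigitChar c, msmDigitChar d]).getD 0 < 10000 := by
  decide

lemma msmF_bounds (x : Int) : 0 ≤ msmF x ∧ msmF x < 10000 := by
  have hx2 : (0:ℤ) ≤ x ^ 2 := sq_nonneg x
  set zs : List Char := PySem.Chars.zfill (PySem.Int.toChars (x ^ 2)) 8 with hzs
  have hlen : 8 ≤ zs.length := by
    rw [hzs, PySem.Chars.length_zfill]; simp
  have hdig : ∀ c ∈ zs, PySem.Chars.isdigit c = true :=
    msm_zfill_digits _ (msm_toChars_digits _ hx2)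
  have hstr : (PySem.Str.slice (PySem.Str.zfill (PySem.Int.toStr (x ^ 2)) 8) (some 2) (some 6)).toList
      = (zs.drop 2).take 4 := by
    simp only [PySem.Str.slice, PySem.Str.zfill, PySem.Int.toStr, String.toList_ofList,
      PySem.Chars.slice_eq_listSlice]
    rw [← hzs, PySem.List.slice_toNat _ (by norm_num) (by norm_num)]
    rfl
  have hmsm : msmF x = (PySem.Int.ofChars? ((zs.drop 2).take 4)).getD 0 := by
    rw [msmF, PySem.Int.ofStr?.eq_1, hstr]
  set cs4 : List Char := (zs.drop 2).take 4 with hcs4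
  have hlen4 : cs4.length = 4 := by
    rw [hcs4]; simp; omega
  have hdig4 : ∀ c ∈ cs4, PySem.Chars.isdigit c = true := by
    intro c hc
    exact hdig c (List.mem_of_mem_drop (List.mem_of_mem_take hc))
  rw [hmsm]
  match cs4, hlen4, hdig4 with
  | [a, b, c, d], _, hdig4 =>
    obtain ⟨ia, rfl⟩ := msm_digit_exists a (hdig4 a (by simp))
    obtain ⟨ib, rfl⟩ := msm_digit_exists b (hdig4 b (by simp))
    obtain ⟨ic, rfl⟩ := msm_digit_exists c (hdig4 c (by simp))
    obtain ⟨id, rfl⟩ := msm_digit_exists d (hdig4 d (by simp))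
    exact msm_ofChars_four ia ib ic id

def msmSeq (a0 : Int) (n : Nat) : Int := msmF^[n] a0

lemma msmSeq_succ (a0 : Int) (n : Nat) : msmSeq a0 (n+1) = msmF (msmSeq a0 n) :=
  Function.iterate_succ_apply' msmF n a0

lemma msm_collision (a0 : Int) : ∃ j i, i < j ∧ j ≤ 10001 ∧ msmSeq a0 i = msmSeq a0 j := by
  have hmaps : ∀ k ∈ Finset.range 10001, msmSeq a0 (k+1) ∈ Finset.Icc (0:ℤ) 9999 := by
    intro k _
    have h := msmF_bounds (msmSeq a0 k)
    rw [← msmSeq_succ] at h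
    simp only [Finset.mem_Icc]
    omega
  have hcard : (Finset.Icc (0:ℤ) 9999).card < (Finset.range 10001).card := by
    rw [Int.card_Icc, Finset.card_range]
    norm_num
  obtain ⟨x, hx, y, hy, hxy, heq⟩ :=
    Finset.exists_ne_map_eq_of_card_lt_of_maps_to hcard hmaps
  simp only [Finset.mem_range] at hx hy
  rcases Nat.lt_or_ge x y with h | h
  · exact ⟨y+1, x+1, by omega, by omega, heq⟩
  · exact ⟨x+1, y+1, by omega, by omega, heq.symm⟩

lemma msmALoop_run (a0 : Int) (N : Nat)
    (hcol : ∃ i, i < N ∧ msmSeq a0 i = msmSeq a0 N)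
    (hinj : ∀ j, j < N → ∀ i, i < j → msmSeq a0 i ≠ msmSeq a0 j) :
    ∀ fuel k, k ≤ N → N + 1 ≤ fuel + k →
      msmALoop fuel ((List.range k).map (msmSeq a0)) (msmSeq a0 k) = (N : Int) := by
  intro fuel
  induction fuel with
  | zero => intro k h1 h2; omega
  | succ fuel ih =>
    intro k hk hfuel
    rw [msmALoop]
    by_cases hkN : k = N
    · subst hkN
      obtain ⟨i0, hi0, he⟩ := hcol
      rw [if_pos]
      · simp [PySem.Set.len]
      · exact (PySem.Set.contains_iff _ _).mpr (List.mem_map.mpr ⟨i0, List.mem_range.mpr hi0, he⟩)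
    · have hnotmem : msmSeq a0 k ∉ (List.range k).map (msmSeq a0) := by
        intro hmem
        obtain ⟨i, hi, he⟩ := List.mem_map.mp hmem
        exact hinj k (by omega) i (List.mem_range.mp hi) he
      rw [if_neg]
      · show msmALoop fuel (PySem.Set.add ((List.range k).map (msmSeq a0)) (msmSeq a0 k)) (msmF (msmSeq a0 k)) = (N : Int)
        rw [PySem.Set.add_of_not_mem hnotmem, ← msmSeq_succ]
        have : (List.range k).map (msmSeq a0) ++ [msmSeq a0 k] = (List.range (k+1)).map (msmSeq a0) := by
          rw [List.range_succ, List.map_append]; rfl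
        rw [this]
        exact ih (k+1) (by omega) (by omega)
      · simp only [Bool.not_eq_true]
        rw [← Bool.not_eq_true]
        intro hcont
        exact hnotmem ((PySem.Set.contains_iff _ _).mp hcont)

lemma msmAdvance_eq : ∀ (n : Nat) (x : Int), msmAdvance n x = msmF^[n] x := by
  intro n
  induction n with
  | zero => intro x; rfl
  | succ n ih => intro x; rw [msmAdvance, ih, Function.iterate_succ_apply]

lemma msmLamLoop_run (y : Int) (L : Nat) (hL : 1 ≤ L) (hy : msmF^[L] y = y)
    (hmin : ∀ k, 1 ≤ k → k < L → msmF^[k] y ≠ y) :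
    ∀ fuel j, 1 ≤ j → j ≤ L → L ≤ fuel + j →
      msmLamLoop fuel y (msmF^[j] y) (j : Int) = (L : Int) := by
  intro fuel
  induction fuel with
  | zero =>
    intro j h1 h2 h3
    have : j = L := by omega
    subst this
    rfl
  | succ fuel ih =>
    intro j h1 h2 h3
    rw [msmLamLoop]
    by_cases hj : j = L
    · subst hj
      rw [hy]
      simp
    · have hne : msmF^[j] y ≠ y := hmin j h1 (by omega)
      rw [if_neg (by simpa using hne), ← Function.iterate_succ_apply' msmF j y]
      have : (j : Int) + 1 = ((j+1 : Nat) : Int) := by push_cast; ring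
      rw [this]
      exact ih (j+1) (by omega) (by omega) (by omega)

lemma msmMuLoop_run (a0 : Int) (L M : Nat)
    (hM : msmSeq a0 M = msmSeq a0 (M + L))
    (hmin : ∀ m, m < M → msmSeq a0 m ≠ msmSeq a0 (m + L)) :
    ∀ fuel m, m ≤ M → M ≤ fuel + m →
      msmMuLoop fuel (msmSeq a0 m) (msmSeq a0 (m + L)) (m : Int) = (M : Int) := by
  intro fuel
  induction fuel with
  | zero =>
    intro m h1 h2
    have : m = M := by omega
    subst this
    rfl
  | succ fuel ih =>
    intro m h1 h2
    rw [msmMuLoop]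
    by_cases hm : m = M
    · subst hm
      rw [← hM]
      simp
    · have hne : msmSeq a0 m ≠ msmSeq a0 (m + L) := hmin m (by omega)
      rw [if_neg (by simpa using fun h => hne h)]
      rw [← msmSeq_succ]
      have hv : msmF (msmSeq a0 (m + L)) = msmSeq a0 ((m+1) + L) := by
        rw [← msmSeq_succ]
        congr 1
        omega
      rw [hv]
      have : (m : Int) + 1 = ((m+1 : Nat) : Int) := by push_cast; ring
      rw [this]
      exact ih (m+1) (by omega) (by omega)

lemma msm_foldl_const (l : List Int) (x : Int) :
    l.foldl (fun w _ => msmF w) x = msmF^[l.length] x := by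
  induction l generalizing x with
  | nil => rfl
  | cons a l ih => simp [List.foldl_cons, ih, Function.iterate_succ_apply]

lemma msm_core (a0 : Int) (N i0 : Nat) (hi0N : i0 < N) (hNle : N ≤ 10001)
    (hi0 : msmSeq a0 i0 = msmSeq a0 N)
    (hinj : ∀ jj, jj < N → ∀ ii, ii < jj → msmSeq a0 ii ≠ msmSeq a0 jj) :
    middle_square_method a0 = middle_square_method_alt a0 := by
  set L := N - i0 with hLdef
  have hL1 : 1 ≤ L := by omega
  have hNi0 : i0 + L = N := by omega
  -- periodicity
  have per : ∀ n, i0 ≤ n → msmSeq a0 (n + L) = msmSeq a0 n := by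
    intro n hn
    induction n, hn using Nat.le_induction with
    | base => rw [hNi0]; exact hi0.symm
    | succ n hn ih =>
      have : n + 1 + L = (n + L) + 1 := by omega
      rw [this, msmSeq_succ, ih, ← msmSeq_succ]
  have perk : ∀ (k n : Nat), i0 ≤ n → msmSeq a0 (n + L * k) = msmSeq a0 n := by
    intro k
    induction k with
    | zero => intro n _; simp
    | succ k ih =>
      intro n hn
      have : n + L * (k+1) = (n + L) + L * k := by ring
      rw [this, ih (n + L) (by omega), per n hn]
  have norm : ∀ n, i0 ≤ n → msmSeq a0 n = msmSeq a0 (i0 + (n - i0) % L) := by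
    intro n hn
    have hdm : L * ((n - i0) / L) + (n - i0) % L = n - i0 := Nat.div_add_mod _ _
    have h1 : n = (i0 + (n - i0) % L) + L * ((n - i0) / L) := by omega
    conv_lhs => rw [h1]
    exact perk _ _ (by omega)
  -- A returns N
  have hA : middle_square_method a0 = (N : Int) := by
    have h := msmALoop_run a0 N ⟨i0, hi0N, hi0⟩ hinj 10002 0 (by omega) (by omega)
    have e1 : ((List.range 0).map (msmSeq a0) : PySem.Set Int) = PySem.Set.empty := rfl
    have e2 : msmSeq a0 0 = a0 := rfl
    rw [e1, e2] at h
    rw [middle_square_method]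
    exact h
  -- B phase 1: y = seq 10001
  have hy : msmAdvance 10001 a0 = msmSeq a0 10001 := msmAdvance_eq 10001 a0
  -- cycle facts at y
  have hcyc : msmF^[L] (msmSeq a0 10001) = msmSeq a0 10001 := by
    have h : msmF^[L] (msmSeq a0 10001) = msmSeq a0 (10001 + L) := by
      rw [Nat.add_comm 10001 L]
      simp only [msmSeq]
      exact (Function.iterate_add_apply msmF L 10001 a0).symm
    rw [h]
    exact per 10001 (by omega)
  have hcycmin : ∀ k, 1 ≤ k → k < L → msmF^[k] (msmSeq a0 10001) ≠ msmSeq a0 10001 := by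
    intro k hk1 hkL heq
    have h1 : msmSeq a0 (10001 + k) = msmSeq a0 10001 := by
      rw [Nat.add_comm 10001 k]
      simp only [msmSeq]
      rw [Function.iterate_add_apply]
      exact heq
    have e1 := norm (10001 + k) (by omega)
    have e2 := norm 10001 (by omega)
    have hr1 : (10001 + k - i0) % L < L := Nat.mod_lt _ (by omega)
    have hr2 : (10001 - i0) % L < L := Nat.mod_lt _ (by omega)
    have heqn : msmSeq a0 (i0 + (10001 + k - i0) % L) = msmSeq a0 (i0 + (10001 - i0) % L) := by
      rw [← e1, ← e2, h1]
    have hreq : (10001 + k - i0) % L = (10001 - i0) % L := by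
      by_contra hne
      rcases Nat.lt_trichotomy (i0 + (10001 + k - i0) % L) (i0 + (10001 - i0) % L) with h | h | h
      · exact hinj _ (by omega) _ h heqn
      · omega
      · exact hinj _ (by omega) _ h heqn.symm
    have hmod : (10001 - i0) % L = ((10001 - i0) + k) % L := by
      rw [show 10001 - i0 + k = 10001 + k - i0 by omega]
      exact hreq.symm
    have hdvd : L ∣ (10001 - i0) + k - (10001 - i0) :=
      (Nat.modEq_iff_dvd' (Nat.le_add_right _ _)).mp hmod
    rw [Nat.add_sub_cancel_left] at hdvd
    have := Nat.le_of_dvd (by omega) hdvd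
    omega
  have hlam : msmLamLoop 10001 (msmSeq a0 10001) (msmF (msmSeq a0 10001)) 1 = (L : Int) := by
    have h := msmLamLoop_run (msmSeq a0 10001) L hL1 hcyc hcycmin 10001 1 (by omega) (by omega) (by omega)
    simpa using h
  -- v advance
  have hvlen : (PySem.List.pyRange 0 (L : Int) 1).length = L := by
    rw [PySem.List.length_pyRange_one]
    omega
  have hv : (PySem.List.pyRange 0 (L : Int) 1).foldl (fun w _ => msmF w) a0 = msmSeq a0 (0 + L) := by
    rw [msm_foldl_const, hvlen]
    simp [msmSeq]
  -- mu loop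
  have hM : msmSeq a0 i0 = msmSeq a0 (i0 + L) := by rw [hNi0]; exact hi0
  have hmmin : ∀ m, m < i0 → msmSeq a0 m ≠ msmSeq a0 (m + L) := by
    intro m hm
    exact fun h => hinj (m + L) (by omega) m (by omega) h
  have hmu := msmMuLoop_run a0 L i0 hM hmmin 10001 0 (by omega) (by omega)
  -- assemble B
  have hB : middle_square_method_alt a0 = (i0 : Int) + (L : Int) := by
    simp only [middle_square_method_alt]
    rw [hy, hlam, hv]
    have hmu' : msmMuLoop 10001 a0 (msmSeq a0 (0 + L)) 0 = (i0 : Int) := hmu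
    rw [hmu']
  rw [hA, hB]
  omega

lemma msm_main (a0 : Int) : middle_square_method a0 = middle_square_method_alt a0 := by
  classical
  obtain ⟨j, i, hij, hj1, hcolij⟩ := msm_collision a0
  have hex : ∃ n, ∃ i, i < n ∧ msmSeq a0 i = msmSeq a0 n := ⟨j, i, hij, hcolij⟩
  have hNspec : ∃ i, i < Nat.find hex ∧ msmSeq a0 i = msmSeq a0 (Nat.find hex) := Nat.find_spec hex
  have hNle : Nat.find hex ≤ 10001 := le_trans (Nat.find_min' hex ⟨i, hij, hcolij⟩) hj1
  have hinj : ∀ jj, jj < Nat.find hex → ∀ ii, ii < jj → msmSeq a0 ii ≠ msmSeq a0 jj := by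
    intro jj hjj ii hii heq
    exact Nat.find_min hex hjj ⟨ii, hii, heq⟩
  obtain ⟨i0, hi0N, hi0⟩ := hNspec
  exact msm_core a0 (Nat.find hex) i0 hi0N hNle hi0 hinj

-- ===== VERDICT (by name: the statement is the Claim_ definition above) =====
theorem middle_square_method_spec : Claim_equal_middle_square_method := by
  intro a0 _
  exact msm_main a0
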